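-- pv_equiv track=rewrite | github.com/xzxcxzxcxzxc/IBI1_2021-22 | group ica/group_ica.py | vulnerabilityCalculator
-- ===== SOURCE A (Python) =====
-- basic = 'ATCG'
--
-- codon_table = {                                             #DNA codon
--     'TTT':'Phe','TTC':'Phe','TTA':'Leu','TTG':'Leu',
--     'TCT':'Ser','TCC':'Ser','TCA':'Ser','TCG':'Ser',
--     'TAT':'Tyr','TAC':'Tyr','TAA':'stop','TAG':'stop',
--     'TGT':'Cys','TGC':'Cys','TGA':'stop','TGG':'Trp',
--     'CTT':'Leu','CTC':'Leu','CTA':'Leu','CTG':'Leu',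
--     'CCT':'Pro','CCC':'Pro','CCA':'Pro','CCG':'Pro',
--     'CAT':'His','CAC':'His','CAA':'Gin','CAG':'Gin',
--     'CGT':'Arg','CGC':'Arg','CGA':'Arg','CGG':'Arg',
--     'ATT':'Ile','ATC':'Ile','ATA':'Ile','ATG':'Met',
--     'ACT':'Thr','ACC':'Thr','ACA':'Thr','ACG':'Thr',
--     'AAT':'Asn','AAC':'Asn','AAA':'Lys','AAG':'Lys',
--     'AGT':'Ser','AGC':'Ser','AGA':'Arg','AGG':'Arg',
--     'GTT':'Val','GTC':'Val','GTA':'Val','GTG':'Val',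
--     'GCT':'Ala','GCC':'Ala','GCA':'Ala','GCG':'Ala',
--     'GAT':'Asp','GAC':'Asp','GAA':'Glu','GAG':'Glu',
--     'GGT':'Gly','GGC':'Gly','GGA':'Gly','GGG':'Gly',
-- }
--
-- def vulnerabilityCalculator(origin):
--     vulnerability = 0
--     for i in range(len(origin)):
--         for j in range(3):
--             mutation = list(origin[i])
--             for h in basic:
--                 if origin[i][j] == h:
--                     continue
--                 else:
--                     mutation[j] = h
--                     if codon_table[''.join(mutation)] == 'stop' and codon_table[origin[i]] != 'stop':   #if a truncating mutation occor, vulnerability + 1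
--                         vulnerability += 1
--     return vulnerability
-- ===== SOURCE B (Python) =====
-- def vulnerabilityCalculator(origin):
--     # A non-stop codon can be truncated by a point mutation iff it is at
--     # Hamming distance 1 from one of the three stop codons; stop codons
--     # themselves contribute nothing.  No codon table is needed; inputs
--     # that are not codons over ATCG are rejected.
--     stops = ('TAA', 'TAG', 'TGA')
--     total = 0
--     for c in origin:
--         if len(c) != 3 or any(ch not in 'ATCG' for ch in c):
--             raise ValueError("invalid codon: %r" % (c,))
--         if c in stops:
--             continue
--         total += sum(1 for s in stops
--                      if sum(a != b for a, b in zip(c, s)) == 1)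
--     return total
-- ===== Notes on version B (the rewrite author's own statement) =====
-- stated objective: idiomatic
-- what changed: Instead of generating all 9 point mutations of each codon and looking each up in the 64-entry codon table, B drops the table entirely: after validating that each element is a 3-letter ATCG codon, a codon that is itself a stop contributes nothing and any other codon contributes the number of stop codons at Hamming distance exactly 1 from it.
import Mathlib
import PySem

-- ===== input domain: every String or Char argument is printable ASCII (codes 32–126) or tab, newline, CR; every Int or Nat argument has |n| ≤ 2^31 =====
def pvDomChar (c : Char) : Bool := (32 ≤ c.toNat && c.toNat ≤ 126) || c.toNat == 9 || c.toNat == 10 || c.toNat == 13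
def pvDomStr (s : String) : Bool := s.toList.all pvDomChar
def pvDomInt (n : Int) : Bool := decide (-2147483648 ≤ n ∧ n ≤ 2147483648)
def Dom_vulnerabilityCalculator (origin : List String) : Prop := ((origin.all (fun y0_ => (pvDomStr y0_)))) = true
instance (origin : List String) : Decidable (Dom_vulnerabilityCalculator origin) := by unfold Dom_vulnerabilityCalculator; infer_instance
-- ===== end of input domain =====

-- B drops A's codon table and its generate-all-9-point-mutations loop: a codon is skipped
-- if it is itself a stop codon, else it contributes the number of stop codons at Hamming
-- distance exactly 1 (idiomatic, not faster).

-- ===== PORT A =====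
def pvBasic : List Char := "ATCG".toList

def codonTable : PySem.Dict String String := PySem.Dict.ofList [
    ("TTT", "Phe"), ("TTC", "Phe"), ("TTA", "Leu"), ("TTG", "Leu"),
    ("TCT", "Ser"), ("TCC", "Ser"), ("TCA", "Ser"), ("TCG", "Ser"),
    ("TAT", "Tyr"), ("TAC", "Tyr"), ("TAA", "stop"), ("TAG", "stop"),
    ("TGT", "Cys"), ("TGC", "Cys"), ("TGA", "stop"), ("TGG", "Trp"),
    ("CTT", "Leu"), ("CTC", "Leu"), ("CTA", "Leu"), ("CTG", "Leu"),
    ("CCT", "Pro"), ("CCC", "Pro"), ("CCA", "Pro"), ("CCG", "Pro"),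
    ("CAT", "His"), ("CAC", "His"), ("CAA", "Gin"), ("CAG", "Gin"),
    ("CGT", "Arg"), ("CGC", "Arg"), ("CGA", "Arg"), ("CGG", "Arg"),
    ("ATT", "Ile"), ("ATC", "Ile"), ("ATA", "Ile"), ("ATG", "Met"),
    ("ACT", "Thr"), ("ACC", "Thr"), ("ACA", "Thr"), ("ACG", "Thr"),
    ("AAT", "Asn"), ("AAC", "Asn"), ("AAA", "Lys"), ("AAG", "Lys"),
    ("AGT", "Ser"), ("AGC", "Ser"), ("AGA", "Arg"), ("AGG", "Arg"),
    ("GTT", "Val"), ("GTC", "Val"), ("GTA", "Val"), ("GTG", "Val"),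
    ("GCT", "Ala"), ("GCC", "Ala"), ("GCA", "Ala"), ("GCG", "Ala"),
    ("GAT", "Asp"), ("GAC", "Asp"), ("GAA", "Glu"), ("GAG", "Glu"),
    ("GGT", "Gly"), ("GGC", "Gly"), ("GGA", "Gly"), ("GGG", "Gly")]

-- the body of A's innermost 'for h in basic' loop; state = (mutation, vulnerability)
def pvAInnerH (codon : String) (j : Int) (st : List Char × Int) (h : Char) : List Char × Int :=
  if PySem.Str.pyGet? codon j = some h then st
  else
    let mutation := PySem.List.pySetD st.1 j h
    if codonTable.getD (String.ofList mutation) "" = "stop" ∧ codonTable.getD codon "" ≠ "stop"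
    then (mutation, st.2 + 1) else (mutation, st.2)

-- the body of A's outer loop over i (codon = origin[i]); j-loop with mutation = list(codon)
def pvAOuter (vul : Int) (codon : String) : Int :=
  (PySem.List.pyRange 0 3 1).foldl
    (fun vul j => (pvBasic.foldl (pvAInnerH codon j) (codon.toList, vul)).2) vul

def vulnerabilityCalculator (origin : List String) : Int :=
  (PySem.List.pyRange 0 (origin.length : Int) 1).foldl
    (fun vul i => pvAOuter vul (PySem.List.pyGetD origin i "")) 0

-- ===== PORT B =====
def pvStops : List String := ["TAA", "TAG", "TGA"]

def pvHamming (c s : String) : Nat :=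
  ((c.toList.zip s.toList).filter (fun p => p.1 ≠ p.2)).length

-- Source B raises ValueError on a non-codon element; Pre_ excludes those inputs,
-- so the guard's value there is irrelevant (we return the accumulator).
def pvIsCodon (c : String) : Bool :=
  c.toList.length == 3 && c.toList.all (fun ch => "ATCG".toList.contains ch)

def vulnerabilityCalculator_alt (origin : List String) : Int :=
  origin.foldl
    (fun total c =>
      if pvIsCodon c = false then total
      else if c ∈ pvStops then total
      else total + ((pvStops.filter (fun s => pvHamming c s = 1)).length : Int)) 0

-- ===== PRECONDITION & SPEC =====
-- A raises (KeyError/IndexError) unless every element is one of the 64 codon_table keys;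
-- Pre_ admits exactly the inputs on which A returns.
def pvValidCodons : List String := ["TTT", "TTC", "TTA", "TTG", "TCT", "TCC", "TCA", "TCG", "TAT", "TAC", "TAA", "TAG", "TGT", "TGC", "TGA", "TGG", "CTT", "CTC", "CTA", "CTG", "CCT", "CCC", "CCA", "CCG", "CAT", "CAC", "CAA", "CAG", "CGT", "CGC", "CGA", "CGG", "ATT", "ATC", "ATA", "ATG", "ACT", "ACC", "ACA", "ACG", "AAT", "AAC", "AAA", "AAG", "AGT", "AGC", "AGA", "AGG", "GTT", "GTC", "GTA", "GTG", "GCT", "GCC", "GCA", "GCG", "GAT", "GAC", "GAA", "GAG", "GGT", "GGC", "GGA", "GGG"]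

def Pre_vulnerabilityCalculator (origin : List String) : Prop := ∀ s ∈ origin, s ∈ pvValidCodons
instance (origin : List String) : Decidable (Pre_vulnerabilityCalculator origin) := by unfold Pre_vulnerabilityCalculator; infer_instance

def pvWitness_vulnerabilityCalculator : List String := ["ATG", "TAA", "TAT"]

def Spec_vulnerabilityCalculator (origin : List String) (out : Int) : Prop := out = vulnerabilityCalculator_alt origin
instance (origin : List String) (out : Int) : Decidable (Spec_vulnerabilityCalculator origin out) := by unfold Spec_vulnerabilityCalculator; infer_instance

-- ===== CLAIM (what is proved, stated in full; the proofs are below) =====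
def Claim_equal_vulnerabilityCalculator : Prop := ∀ (origin : List String), Dom_vulnerabilityCalculator origin → Pre_vulnerabilityCalculator origin → Spec_vulnerabilityCalculator origin (vulnerabilityCalculator origin)

-- ===== LEMMAS AND PROOFS =====

-- A's per-codon contribution, as the inner two loops run from vulnerability 0
def pvKA (codon : String) : Int := pvAOuter 0 codon

-- B's per-codon contribution
def pvKB (codon : String) : Int :=
  if pvIsCodon codon = false then 0
  else if codon ∈ pvStops then 0
  else ((pvStops.filter (fun s => pvHamming codon s = 1)).length : Int)

-- one step of the h-loop: the mutation component ignores the count and the count shifts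
theorem pvAInnerH_shift (codon : String) (j : Int) (m : List Char) (v : Int) (h : Char) :
    pvAInnerH codon j (m, v) h
      = ((pvAInnerH codon j (m, 0) h).1, v + (pvAInnerH codon j (m, 0) h).2) := by
  unfold pvAInnerH
  dsimp only
  split_ifs <;> simp

-- the whole h-fold: mutation component ignores the count, count shifts by it
theorem foldl_innerH_shift (codon : String) (j : Int) (l : List Char) (m : List Char) (v : Int) :
    l.foldl (pvAInnerH codon j) (m, v)
      = ((l.foldl (pvAInnerH codon j) (m, 0)).1, v + (l.foldl (pvAInnerH codon j) (m, 0)).2) := by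
  induction l generalizing m v with
  | nil => simp
  | cons h t ih =>
    rw [List.foldl_cons, List.foldl_cons, pvAInnerH_shift, ih]
    conv_rhs => rw [← Prod.mk.eta (p := pvAInnerH codon j (m, 0) h)]
    rw [ih ((pvAInnerH codon j (m, 0) h).1) ((pvAInnerH codon j (m, 0) h).2)]
    rw [add_assoc]

theorem pvAOuter_shift (vul : Int) (codon : String) : pvAOuter vul codon = vul + pvKA codon := by
  unfold pvKA pvAOuter
  generalize PySem.List.pyRange 0 3 1 = rng
  induction rng generalizing vul with
  | nil => simp
  | cons j t ih =>
    simp only [List.foldl_cons]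
    rw [ih, ih ((pvBasic.foldl (pvAInnerH codon j) (codon.toList, 0)).2),
        foldl_innerH_shift codon j pvBasic codon.toList vul]
    omega

set_option maxRecDepth 100000 in
theorem pvK_eq : ∀ c ∈ pvValidCodons, pvKA c = pvKB c := by decide

theorem vulnerabilityCalculator_eq_fold (origin : List String) :
    vulnerabilityCalculator origin = origin.foldl pvAOuter 0 := by
  unfold vulnerabilityCalculator
  rw [PySem.List.foldl_pyRange_zero_pyGetD']

-- ===== VERDICT (by name: the statement is the Claim_ definition above) =====
theorem vulnerabilityCalculator_spec : Claim_equal_vulnerabilityCalculator := by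
  intro origin _ hpre
  unfold Spec_vulnerabilityCalculator
  rw [vulnerabilityCalculator_eq_fold]
  unfold vulnerabilityCalculator_alt
  refine PySem.List.foldl_congr_mem' _ _ _ _ ?_
  intro c hc acc
  rw [pvAOuter_shift, pvK_eq c (hpre c hc)]
  unfold pvKB
  split_ifs <;> omega
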